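-- pv_equiv track=rewrite | github.com/koomin1227/CodingTestPractice | programmers/level2/방금그곡.Py | convert_music_to_played_music
-- ===== SOURCE A (Python) =====
-- def convert_music_to_played_music(music, play_time):
--     if len(music) >= play_time:
--         return music[:play_time]
--     else:
--         j = 0
--         played_music = []
--         for i in range(play_time):
--             played_music.append(music[j])
--             j = (j + 1) % len(music)
--         return played_music
-- ===== SOURCE B (Python) =====
-- def convert_music_to_played_music(music, play_time):
--     if len(music) >= play_time:
--         return music[:play_time]
--     q, r = divmod(play_time, len(music))
--     return list(music) * q + list(music[:r])
-- ===== Notes on version B (the rewrite author's own statement) =====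
-- stated objective: alternative
-- what changed: Replaces the element-by-element loop with a modular index by divmod-based block replication: the whole melody repeated q times plus a slice of length r.
import Mathlib
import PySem

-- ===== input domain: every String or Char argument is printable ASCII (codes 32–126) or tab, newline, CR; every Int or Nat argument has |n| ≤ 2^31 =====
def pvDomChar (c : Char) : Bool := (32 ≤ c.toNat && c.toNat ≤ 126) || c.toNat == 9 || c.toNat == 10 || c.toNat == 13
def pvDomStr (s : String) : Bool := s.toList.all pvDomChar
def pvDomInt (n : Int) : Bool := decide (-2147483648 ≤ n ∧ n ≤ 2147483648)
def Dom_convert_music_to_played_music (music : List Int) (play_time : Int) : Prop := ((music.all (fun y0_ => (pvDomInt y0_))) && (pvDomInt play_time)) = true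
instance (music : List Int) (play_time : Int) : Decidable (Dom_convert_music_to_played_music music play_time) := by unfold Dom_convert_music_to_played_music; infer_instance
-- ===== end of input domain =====

-- B replaces A's element-by-element loop with a modular index by divmod block replication
-- (melody repeated q times plus a slice of length r); equal return values on Pre_.

-- ===== PORT A =====
def convert_music_to_played_music (music : List Int) (play_time : Int) : List Int :=
  if (music.length : Int) ≥ play_time then
    PySem.List.slice music none (some play_time)
  else
    ((PySem.List.pyRange 0 play_time 1).foldl
      (fun (st : Int × List Int) _ =>
        (PySem.Int.mod (st.1 + 1) (music.length : Int),
         st.2 ++ [PySem.List.pyGetD music st.1 0]))   -- music[j]: j is always in range on Pre_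
      (0, [])).2

-- ===== PORT B =====
def convert_music_to_played_music_alt (music : List Int) (play_time : Int) : List Int :=
  if (music.length : Int) ≥ play_time then
    PySem.List.slice music none (some play_time)
  else
    match PySem.Int.divmod? play_time (music.length : Int) with
    | none => []   -- ZeroDivisionError in Python; excluded by Pre_
    | some (q, r) =>
      (List.replicate q.toNat music).flatten ++ PySem.List.slice music none (some r)

-- ===== PRECONDITION & SPEC =====
-- Pre_ excludes (music = [], play_time > 0): there A raises IndexError and B raises ZeroDivisionError.
def Pre_convert_music_to_played_music (music : List Int) (play_time : Int) : Prop :=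
  music ≠ [] ∨ play_time ≤ 0
instance (music : List Int) (play_time : Int) : Decidable (Pre_convert_music_to_played_music music play_time) := by unfold Pre_convert_music_to_played_music; infer_instance

def pvWitness_convert_music_to_played_music : List Int × Int := ([1, 2, 3], 8)

def Spec_convert_music_to_played_music (music : List Int) (play_time : Int) (out : List Int) : Prop := out = convert_music_to_played_music_alt music play_time
instance (music : List Int) (play_time : Int) (out : List Int) : Decidable (Spec_convert_music_to_played_music music play_time out) := by unfold Spec_convert_music_to_played_music; infer_instance

-- ===== CLAIM (what is proved, stated in full; the proofs are below) =====
def Claim_equal_convert_music_to_played_music : Prop := ∀ (music : List Int) (play_time : Int), Dom_convert_music_to_played_music music play_time → Pre_convert_music_to_played_music music play_time → Spec_convert_music_to_played_music music play_time (convert_music_to_played_music music play_time)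

-- ===== LEMMAS AND PROOFS =====

-- Invariant for A's loop: starting from j = k % L, processing n more elements appends
-- the notes of the cyclic melody at positions k, k+1, …, k+n-1 (mod L).
theorem loopA_invariant (music : List Int) (l : List Int) :
    ∀ (k : Nat) (acc : List Int),
      l.foldl
        (fun (st : Int × List Int) _ =>
          (PySem.Int.mod (st.1 + 1) (music.length : Int),
           st.2 ++ [PySem.List.pyGetD music st.1 0]))
        (((k % music.length : Nat) : Int), acc)
      = ((((k + l.length) % music.length : Nat) : Int),
         acc ++ (List.range l.length).map (fun i => music.getD ((k + i) % music.length) 0)) := by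
  induction l with
  | nil => intro k acc; simp
  | cons x xs ih =>
    intro k acc
    simp only [List.foldl_cons, List.length_cons]
    have h1 : PySem.Int.mod (((k % music.length : Nat) : Int) + 1) (music.length : Int)
        = (((k + 1) % music.length : Nat) : Int) := by
      have he : (((k % music.length : Nat) : Int) + 1) = (((k % music.length + 1 : Nat)) : Int) := by
        push_cast; ring
      rw [he, PySem.Int.mod_natCast]
      congr 1
      exact Nat.mod_add_mod k music.length 1
    have h2 : PySem.List.pyGetD music (((k % music.length : Nat) : Int)) 0
        = music.getD (k % music.length) 0 := PySem.List.pyGetD_natCast music (k % music.length) 0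
    rw [h1, h2, ih (k + 1)]
    have ha : k + 1 + xs.length = k + (xs.length + 1) := by omega
    refine Prod.ext ?_ ?_
    · simp only
      rw [ha]
    · simp only [List.range_succ_eq_map, List.map_cons, List.map_map, List.append_assoc,
        List.singleton_append]
      congr 2
      apply List.map_congr_left
      intro i _
      simp only [Function.comp_apply]
      have hb : k + 1 + i = k + (i + 1) := by omega
      rw [hb]

-- One full period of the cyclic melody is the melody itself.
theorem cyc_full (music : List Int) (n : Nat) :
    (List.range (music.length + n)).map (fun i => music.getD (i % music.length) 0)
      = music ++ (List.range n).map (fun i => music.getD (i % music.length) 0) := by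
  rw [List.range_add, List.map_append, List.map_map]
  congr 1
  · apply List.ext_getElem
    · simp
    · intro i h1 h2
      simp only [List.getElem_map, List.getElem_range]
      rw [Nat.mod_eq_of_lt (by simpa using h2)]
      rw [List.getD_eq_getElem?_getD, List.getElem?_eq_getElem (by simpa using h2)]
      simp
  · apply List.map_congr_left
    intro i _
    simp only [Function.comp_apply, Nat.add_mod_left]

-- q periods plus a remainder, by induction on q.
theorem cyc_blocks (music : List Int) (q m : Nat) :
    (List.range (q * music.length + m)).map (fun i => music.getD (i % music.length) 0)
      = (List.replicate q music).flatten
        ++ (List.range m).map (fun i => music.getD (i % music.length) 0) := by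
  induction q with
  | zero => simp
  | succ p ih =>
    have he : (p + 1) * music.length + m = music.length + (p * music.length + m) := by ring
    rw [he, cyc_full, ih, List.replicate_succ]
    simp

-- Fewer than one period is a prefix of the melody.
theorem cyc_take (music : List Int) (m : Nat) (hm : m ≤ music.length) :
    (List.range m).map (fun i => music.getD (i % music.length) 0) = music.take m := by
  apply List.ext_getElem
  · simp [hm]
  · intro i h1 h2
    simp only [List.getElem_map, List.getElem_range, List.getElem_take]
    have hi : i < m := by simpa using h1
    rw [Nat.mod_eq_of_lt (by omega)]
    rw [List.getD_eq_getElem?_getD, List.getElem?_eq_getElem (by omega)]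
    simp

-- ===== VERDICT (by name: the statement is the Claim_ definition above) =====
theorem convert_music_to_played_music_spec : Claim_equal_convert_music_to_played_music := by
  intro music play_time _ hpre
  unfold Spec_convert_music_to_played_music
  unfold convert_music_to_played_music convert_music_to_played_music_alt
  by_cases hb : (music.length : Int) ≥ play_time
  · simp [hb]
  · simp only [hb, if_false]
    have hne : music ≠ [] := by
      rcases hpre with h | h
      · exact h
      · intro hnil; subst hnil; simp at hb; omega
    have hL : 0 < music.length := List.length_pos_iff.mpr hne
    have hLz : (music.length : Int) ≠ 0 := by exact_mod_cast Nat.pos_iff_ne_zero.mp hL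
    have hpt : (music.length : Int) < play_time := by omega
    have hdm : PySem.Int.divmod? play_time (music.length : Int)
        = some (PySem.Int.floordiv play_time (music.length : Int),
                PySem.Int.mod play_time (music.length : Int)) := by
      simp [PySem.Int.divmod?, hne, PySem.Int.floordiv, PySem.Int.mod]
    rw [hdm]
    have hlen : (PySem.List.pyRange 0 play_time 1).length = play_time.toNat := by
      rw [PySem.List.length_pyRange_one]; congr 1; omega
    have hinv := loopA_invariant music (PySem.List.pyRange 0 play_time 1) 0 []
    rw [Nat.zero_mod] at hinv
    simp only [Nat.cast_zero] at hinv
    rw [hinv, hlen]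
    simp only [List.nil_append, Nat.zero_add]
    set q := PySem.Int.floordiv play_time (music.length : Int) with hq
    set r := PySem.Int.mod play_time (music.length : Int) with hr
    show _ = (List.replicate q.toNat music).flatten ++ PySem.List.slice music none (some r)
    have hqr : q * (music.length : Int) + r = play_time := by
      rw [hq, hr]; exact PySem.Int.floordiv_mul_add_mod play_time (music.length : Int)
    have hLpos : (0 : Int) < (music.length : Int) := by exact_mod_cast hL
    have hrnn : 0 ≤ r := PySem.Int.mod_nonneg play_time hLpos
    have hrlt : r < (music.length : Int) := PySem.Int.mod_lt play_time hLpos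
    have hq1 : 1 ≤ q := by nlinarith [hqr, hrlt, hpt, hLpos]
    have hsplit : play_time.toNat = q.toNat * music.length + r.toNat := by
      have hqn : (q.toNat : Int) = q := Int.toNat_of_nonneg (by omega)
      have hrn : (r.toNat : Int) = r := Int.toNat_of_nonneg hrnn
      have : ((q.toNat * music.length + r.toNat : Nat) : Int) = play_time := by
        push_cast [hqn, hrn]; linarith [hqr]
      omega
    rw [hsplit, cyc_blocks, cyc_take music r.toNat (by omega)]
    congr 1
    have hrcast : r = ((r.toNat : Nat) : Int) := (Int.toNat_of_nonneg hrnn).symm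
    rw [hrcast, PySem.List.slice_to_natCast]
    simp
    omega
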